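-- pv_equiv track=rewrite | github.com/karoborko/Two | score.py | Score2
-- ===== SOURCE A (Python) =====
-- def Score2(s, DNA, k):
--     A, C, G, T = 0, 0, 0, 0
--     i = 0
--     score = 0
--     while (i < k):
--         j = 0
--         while (j < len(s)):
--             baza = DNA[j][s[j] + i]
--             if (baza == 'a'):
--                 A = A + 1
--             elif (baza == 'c'):
--                 C = C + 1
--             elif (baza == 'g'):
--                 G = G + 1
--             elif (baza == 't'):
--                 T = T + 1
--             j = j + 1
--         score = score + max([A, C, G, T])
--         i = i + 1
--         A, C, G, T = 0, 0, 0, 0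
--     return (score)
-- ===== SOURCE B (Python) =====
-- def _bump(c, b):
--     a_, c_, g_, t_ = c
--     if b == 'a':
--         return (a_ + 1, c_, g_, t_)
--     if b == 'c':
--         return (a_, c_ + 1, g_, t_)
--     if b == 'g':
--         return (a_, c_, g_ + 1, t_)
--     if b == 't':
--         return (a_, c_, g_, t_ + 1)
--     return c
--
--
-- def Score2(s, DNA, k):
--     # Phase 1: build a k-column count table row by row (loop order swapped vs A).
--     counts = [(0, 0, 0, 0)] * k
--     for j in range(len(s)):
--         counts = [_bump(c, DNA[j][s[j] + i]) for i, c in enumerate(counts)]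
--     # Phase 2: score the finished table.
--     return sum(max(c) for c in counts)
-- ===== Notes on version B (the rewrite author's own statement) =====
-- stated objective: alternative
-- what changed: A scans column-major (i outer, j inner) with four counters reset per column, scoring each column as soon as it is counted; B interchanges the loops: it accumulates a whole k-entry count table row by row (j outer) and only then, in a separate pass, sums the per-column maxima.
import Mathlib
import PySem

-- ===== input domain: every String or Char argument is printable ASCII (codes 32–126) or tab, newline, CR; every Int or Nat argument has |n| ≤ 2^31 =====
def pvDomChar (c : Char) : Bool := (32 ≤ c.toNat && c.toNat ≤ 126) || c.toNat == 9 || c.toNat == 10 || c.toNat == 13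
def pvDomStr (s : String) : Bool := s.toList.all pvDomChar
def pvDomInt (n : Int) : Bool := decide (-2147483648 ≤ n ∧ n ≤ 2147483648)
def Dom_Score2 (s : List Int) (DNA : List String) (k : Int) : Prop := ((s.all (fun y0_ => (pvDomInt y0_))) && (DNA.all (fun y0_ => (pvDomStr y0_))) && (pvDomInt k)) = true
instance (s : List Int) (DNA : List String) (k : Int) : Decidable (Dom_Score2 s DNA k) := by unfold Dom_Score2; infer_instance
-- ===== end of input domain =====

-- B interchanges A's loops: it accumulates a k-entry count table row by row and scores it in a
-- separate pass, instead of A's column-at-a-time counters; objective: alternative decomposition.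

-- ===== PORT A =====
-- literal port of A: outer while over i < k, inner while over j < len(s) updating four counters,
-- then score += max([A,C,G,T]).  DNA[j][s[j]+i] is PySem indexing; the '?' default is never
-- reached inside Pre_Score2 (Python raises IndexError exactly there).
def Score2 (s : List Int) (DNA : List String) (k : Int) : Int :=
  (PySem.List.pyRange 0 k 1).foldl (fun score i =>
    let acc :=
      (List.range s.length).foldl (fun (acc : Int × Int × Int × Int) (j : Nat) =>
        let baza := (PySem.Str.pyGet? (PySem.List.pyGetD DNA (j : Int) "")
                      (PySem.List.pyGetD s (j : Int) 0 + i)).getD '?'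
        if baza = 'a' then (acc.1 + 1, acc.2.1, acc.2.2.1, acc.2.2.2)
        else if baza = 'c' then (acc.1, acc.2.1 + 1, acc.2.2.1, acc.2.2.2)
        else if baza = 'g' then (acc.1, acc.2.1, acc.2.2.1 + 1, acc.2.2.2)
        else if baza = 't' then (acc.1, acc.2.1, acc.2.2.1, acc.2.2.2 + 1)
        else acc) ((0 : Int), (0 : Int), (0 : Int), (0 : Int))
    score + (PySem.List.max? [acc.1, acc.2.1, acc.2.2.1, acc.2.2.2] (fun y => y)).getD 0) 0

-- ===== PORT B =====
-- port of Source B's _bump helper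
def pvBump (c : Int × Int × Int × Int) (b : Char) : Int × Int × Int × Int :=
  if b = 'a' then (c.1 + 1, c.2.1, c.2.2.1, c.2.2.2)
  else if b = 'c' then (c.1, c.2.1 + 1, c.2.2.1, c.2.2.2)
  else if b = 'g' then (c.1, c.2.1, c.2.2.1 + 1, c.2.2.2)
  else if b = 't' then (c.1, c.2.1, c.2.2.1, c.2.2.2 + 1)
  else c

-- port of Source B: counts = [(0,0,0,0)] * k; for each row j rebuild the table with _bump over
-- enumerate(counts); finally sum(max(c) for c in counts).  Same '?' default as port A.
def Score2_alt (s : List Int) (DNA : List String) (k : Int) : Int :=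
  let counts0 : List (Int × Int × Int × Int) := PySem.List.pyRepeat [(0, 0, 0, 0)] k
  let counts := (List.range s.length).foldl (fun counts (j : Nat) =>
    (PySem.List.enumerate counts).map (fun ic =>
      pvBump ic.2 ((PySem.Str.pyGet? (PySem.List.pyGetD DNA (j : Int) "")
        (PySem.List.pyGetD s (j : Int) 0 + ic.1)).getD '?'))) counts0
  (counts.map (fun c => max c.1 (max c.2.1 (max c.2.2.1 c.2.2.2)))).sum

-- ===== PRECONDITION & SPEC =====
-- Pre_ excludes exactly the inputs where Python A raises IndexError: whenever the loop body runs
-- (k > 0), every j < len(s) needs DNA[j] defined and s[j]+i a valid (possibly negative) index into it.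
def Pre_Score2 (s : List Int) (DNA : List String) (k : Int) : Prop :=
  0 < k → ∀ j ∈ List.range s.length,
    j < DNA.length ∧
    -(((DNA.getD j "").toList.length : Int)) ≤ s.getD j 0 ∧
    s.getD j 0 + k - 1 < ((DNA.getD j "").toList.length : Int)
instance (s : List Int) (DNA : List String) (k : Int) : Decidable (Pre_Score2 s DNA k) := by
  unfold Pre_Score2; infer_instance
def pvWitness_Score2 : List Int × List String × Int := ([0, 1], ["acg", "tgca"], 2)
def Spec_Score2 (s : List Int) (DNA : List String) (k : Int) (out : Int) : Prop := out = Score2_alt s DNA k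
instance (s : List Int) (DNA : List String) (k : Int) (out : Int) : Decidable (Spec_Score2 s DNA k out) := by unfold Spec_Score2; infer_instance

-- ===== CLAIM (what is proved, stated in full; the proofs are below) =====
def Claim_equal_Score2 : Prop := ∀ (s : List Int) (DNA : List String) (k : Int), Dom_Score2 s DNA k → Pre_Score2 s DNA k → Spec_Score2 s DNA k (Score2 s DNA k)

-- ===== LEMMAS AND PROOFS =====

-- enumerating a table rebuilt by mapping over its enumeration keeps the same indices
theorem pvEnumMapEnum {X Y : Type} (C : List X) (st : Int) (f : Int → X → Y) :
    PySem.List.enumerate ((PySem.List.enumerate C st).map (fun ic => f ic.1 ic.2)) st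
      = (PySem.List.enumerate C st).map (fun ic => (ic.1, f ic.1 ic.2)) := by
  induction C generalizing st with
  | nil => simp [PySem.List.enumerate_nil]
  | cons x xs ih => simp [PySem.List.enumerate_cons, ih]

-- loop interchange: folding row-updates over js acts independently on each table cell
theorem pvInterchange {X : Type} (js : List Nat) (F : Nat → Int → X → X) (C : List X) (st : Int) :
    js.foldl (fun C j => (PySem.List.enumerate C st).map (fun ic => F j ic.1 ic.2)) C
      = (PySem.List.enumerate C st).map (fun ic => js.foldl (fun x j => F j ic.1 x) ic.2) := by
  induction js generalizing C with
  | nil =>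
    simp only [List.foldl_nil]
    exact (PySem.List.map_snd_enumerate C st).symm
  | cons j js ih =>
    simp only [List.foldl_cons, ih, pvEnumMapEnum, List.map_map]
    rfl

-- the two ports agree on every input (both use the same '?' default out of range)
theorem pvScore2_eq (s : List Int) (DNA : List String) (k : Int) :
    Score2 s DNA k = Score2_alt s DNA k := by
  have hB : Score2_alt s DNA k =
      ((((List.range s.length).foldl (fun counts (j : Nat) =>
          (PySem.List.enumerate counts 0).map (fun ic =>
            pvBump ic.2 ((PySem.Str.pyGet? (PySem.List.pyGetD DNA (j : Int) "")
              (PySem.List.pyGetD s (j : Int) 0 + ic.1)).getD '?')))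
          (PySem.List.pyRepeat [(0, 0, 0, 0)] k)).map
        (fun c => max c.1 (max c.2.1 (max c.2.2.1 c.2.2.2)))).sum : Int) := rfl
  rw [hB, pvInterchange (st := 0) (F := fun j i c =>
    pvBump c ((PySem.Str.pyGet? (PySem.List.pyGetD DNA (j : Int) "")
      (PySem.List.pyGetD s (j : Int) 0 + i)).getD '?'))]
  unfold Score2
  rw [PySem.List.foldl_add (a := 0)]
  rw [PySem.List.enumerate_eq_map_pyRange _ ((0 : Int), (0 : Int), (0 : Int), (0 : Int)),
      PySem.List.pyRepeat_singleton]
  simp only [List.map_map, zero_add, PySem.List.len_eq]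
  have hr : PySem.List.pyRange 0 (((List.replicate k.toNat
      ((0 : Int), (0 : Int), (0 : Int), (0 : Int))).length : Int)) 1 = PySem.List.pyRange 0 k 1 := by
    have h0 : (max k 0).toNat = k.toNat := by omega
    simp [PySem.List.pyRange_one, h0]
  rw [hr]
  congr 1
  apply List.map_congr_left
  intro i _
  simp only [Function.comp_apply]
  have hd : PySem.List.pyGetD (List.replicate k.toNat ((0 : Int), (0 : Int), (0 : Int), (0 : Int)))
      i ((0 : Int), (0 : Int), (0 : Int), (0 : Int)) = ((0 : Int), (0 : Int), (0 : Int), (0 : Int)) := by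
    rcases h : PySem.List.pyGet? (List.replicate k.toNat
        ((0 : Int), (0 : Int), (0 : Int), (0 : Int))) i with _ | v
    · simp [PySem.List.pyGetD, h]
    · have := PySem.List.mem_of_pyGet?_eq_some _ h
      simp [List.eq_of_mem_replicate this, PySem.List.pyGetD, h]
  rw [hd]
  have hfold : (List.range s.length).foldl (fun (acc : Int × Int × Int × Int) (j : Nat) =>
        let baza := (PySem.Str.pyGet? (PySem.List.pyGetD DNA (j : Int) "")
                      (PySem.List.pyGetD s (j : Int) 0 + i)).getD '?'
        if baza = 'a' then (acc.1 + 1, acc.2.1, acc.2.2.1, acc.2.2.2)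
        else if baza = 'c' then (acc.1, acc.2.1 + 1, acc.2.2.1, acc.2.2.2)
        else if baza = 'g' then (acc.1, acc.2.1, acc.2.2.1 + 1, acc.2.2.2)
        else if baza = 't' then (acc.1, acc.2.1, acc.2.2.1, acc.2.2.2 + 1)
        else acc) ((0 : Int), (0 : Int), (0 : Int), (0 : Int))
      = (List.range s.length).foldl (fun x (j : Nat) =>
        pvBump x ((PySem.Str.pyGet? (PySem.List.pyGetD DNA (j : Int) "")
          (PySem.List.pyGetD s (j : Int) 0 + i)).getD '?')) ((0 : Int), (0 : Int), (0 : Int), (0 : Int)) := rfl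
  rw [hfold]
  generalize (List.range s.length).foldl (fun x (j : Nat) =>
        pvBump x ((PySem.Str.pyGet? (PySem.List.pyGetD DNA (j : Int) "")
          (PySem.List.pyGetD s (j : Int) 0 + i)).getD '?')) ((0 : Int), (0 : Int), (0 : Int), (0 : Int)) = c
  rw [PySem.List.max?_id_cons]
  simp only [Option.getD_some, List.foldl_cons, List.foldl_nil]
  omega

-- ===== VERDICT (by name: the statement is the Claim_ definition above) =====
theorem Score2_spec : Claim_equal_Score2 := by
  intro s DNA k _ _
  exact pvScore2_eq s DNA k
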